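-- pv_equiv track=rewrite | github.com/shaggitza/spellcheck_poc | backend/engines/spell_check_engines.py | _filter_suggestions_by_context
-- ===== SOURCE A (Python) =====
-- from typing import Dict, List, Optional, Tuple
--
-- def _filter_suggestions_by_context(word: str, suggestions: List[str], context: Dict) -> List[str]:
--     """Filter and rank suggestions based on sentence context."""
--     if not suggestions:
--         return suggestions
--
--     # If original word was capitalized, prioritize capitalized suggestions
--     if word[0].isupper():
--         capitalized_suggestions = [s for s in suggestions if s[0].isupper()]
--         lowercase_suggestions = [s.capitalize() for s in suggestions if s[0].islower()]
--         return (capitalized_suggestions + lowercase_suggestions)[:15]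
--
--     return suggestions
-- ===== SOURCE B (Python) =====
-- def _filter_suggestions_by_context(word, suggestions, context):
--     """Filter and rank suggestions based on sentence context."""
--     if not suggestions:
--         return suggestions
--
--     if word[0].isupper():
--         # keep only cased suggestions, stably rank uppercase-initial ones first,
--         # then capitalize the lowercase-initial ones in one pass
--         cased = [s for s in suggestions if s[0].isupper() or s[0].islower()]
--         ranked = sorted(cased, key=lambda s: not s[0].isupper())
--         return [s if s[0].isupper() else s.capitalize() for s in ranked][:15]
--
--     return suggestions
-- ===== Notes on version B (the rewrite author's own statement) =====
-- stated objective: alternative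
-- what changed: Replaces A's two-bucket partition (two filter comprehensions concatenated) by a single stable sort of the cased suggestions on the priority key 'not s[0].isupper()' followed by one capitalizing pass.
import Mathlib
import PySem

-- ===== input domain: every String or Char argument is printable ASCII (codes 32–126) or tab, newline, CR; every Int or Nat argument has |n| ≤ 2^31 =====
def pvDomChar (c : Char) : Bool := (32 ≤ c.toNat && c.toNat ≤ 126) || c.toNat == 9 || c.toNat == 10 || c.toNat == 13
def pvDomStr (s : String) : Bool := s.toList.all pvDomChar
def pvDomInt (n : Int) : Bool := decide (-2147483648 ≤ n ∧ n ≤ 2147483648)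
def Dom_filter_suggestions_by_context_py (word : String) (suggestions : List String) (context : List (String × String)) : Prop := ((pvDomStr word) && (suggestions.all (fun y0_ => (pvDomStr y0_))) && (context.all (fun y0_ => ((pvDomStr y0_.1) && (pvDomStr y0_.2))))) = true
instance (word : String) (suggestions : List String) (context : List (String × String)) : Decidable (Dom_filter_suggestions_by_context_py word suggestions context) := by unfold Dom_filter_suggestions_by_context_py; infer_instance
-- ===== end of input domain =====

-- B replaces A's two-bucket partition (two filter passes + concatenation) by a single
-- stable sort on a two-valued priority key over the cased suggestions followed by one
-- capitalizing pass; objective: alternative decomposition, same observable behaviour.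

-- shared helpers: first character (only read under Pre_, where the string is nonempty)
-- and an exact ASCII port of Python's str.capitalize (upper first char, lower the rest)
def pvHead (s : String) : Char := s.toList.headD ' '
def pvCapitalize (s : String) : String :=
  match s.toList with
  | [] => ""
  | c :: rest => String.mk (PySem.Chars.upperChar c :: rest.map PySem.Chars.lowerChar)

-- ===== PORT A =====
def filter_suggestions_by_context_py (word : String) (suggestions : List String) (context : List (String × String)) : List String :=
  if suggestions = [] then suggestions
  else if PySem.Chars.isupper (pvHead word) then
    let capitalized_suggestions := suggestions.filter (fun s => PySem.Chars.isupper (pvHead s))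
    let lowercase_suggestions := (suggestions.filter (fun s => PySem.Chars.islower (pvHead s))).map pvCapitalize
    PySem.List.slice (capitalized_suggestions ++ lowercase_suggestions) none (some 15)
  else suggestions

-- ===== PORT B =====
def filter_suggestions_by_context_py_alt (word : String) (suggestions : List String) (context : List (String × String)) : List String :=
  if suggestions = [] then suggestions
  else if PySem.Chars.isupper (pvHead word) then
    let cased := suggestions.filter (fun s => PySem.Chars.isupper (pvHead s) || PySem.Chars.islower (pvHead s))
    -- key `not s[0].isupper()`: False (0) sorts before True (1), stably
    let ranked := PySem.List.sorted cased (fun s => if PySem.Chars.isupper (pvHead s) then (0 : Nat) else 1)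
    PySem.List.slice (ranked.map (fun s => if PySem.Chars.isupper (pvHead s) then s else pvCapitalize s)) none (some 15)
  else suggestions

-- ===== PRECONDITION & SPEC =====
-- Pre_ excludes exactly the inputs where Python A raises IndexError: a nonempty
-- suggestion list with an empty word (word[0]), and, when word is capitalized,
-- any empty suggestion string (s[0]).
def Pre_filter_suggestions_by_context_py (word : String) (suggestions : List String) (context : List (String × String)) : Prop :=
  suggestions = [] ∨ (word ≠ "" ∧ (PySem.Chars.isupper (pvHead word) = true → ∀ s ∈ suggestions, s ≠ ""))
instance (word : String) (suggestions : List String) (context : List (String × String)) : Decidable (Pre_filter_suggestions_by_context_py word suggestions context) := by unfold Pre_filter_suggestions_by_context_py; infer_instance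
def pvWitness_filter_suggestions_by_context_py : String × List String × (List (String × String)) :=
  ("Word", ["alpha", "Beta", "1x", "gamma"], [])
def Spec_filter_suggestions_by_context_py (word : String) (suggestions : List String) (context : List (String × String)) (out : List String) : Prop := out = filter_suggestions_by_context_py_alt word suggestions context
instance (word : String) (suggestions : List String) (context : List (String × String)) (out : List String) : Decidable (Spec_filter_suggestions_by_context_py word suggestions context out) := by unfold Spec_filter_suggestions_by_context_py; infer_instance

-- ===== CLAIM (what is proved, stated in full; the proofs are below) =====
def Claim_equal_filter_suggestions_by_context_py : Prop := ∀ (word : String) (suggestions : List String) (context : List (String × String)), Dom_filter_suggestions_by_context_py word suggestions context → Pre_filter_suggestions_by_context_py word suggestions context → Spec_filter_suggestions_by_context_py word suggestions context (filter_suggestions_by_context_py word suggestions context)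

-- ===== LEMMAS AND PROOFS =====

-- an upper-case ASCII first char is not lower-case
theorem pv_up_not_low (c : Char) (h : PySem.Chars.isupper c = true) : PySem.Chars.islower c = false := by
  simp [PySem.Chars.isupper] at h
  simp [PySem.Chars.islower]
  intro hac
  exact absurd (lt_of_le_of_lt h.2 (by decide : 'Z' < 'a')) (not_lt.2 hac)

-- insertion passes a block it is not `before`
theorem pv_insertBy_append (before : α → α → Bool) (x : α) (A B : List α)
    (hA : ∀ a ∈ A, before x a = false) :
    PySem.List.insertBy before x (A ++ B) = A ++ PySem.List.insertBy before x B := by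
  induction A with
  | nil => simp
  | cons a A ih =>
    have hxa := hA a (by simp)
    simp [PySem.List.insertBy, hxa]
    exact ih (fun a ha => hA a (by simp [ha]))

-- stable insertion sort with the two-valued key 0/1 is: p-block first, ¬p-block after
theorem pv_fold_two {α : Type} (p : α → Bool) (xs A B : List α)
    (hA : ∀ a ∈ A, p a = true) (hB : ∀ b ∈ B, p b = false) :
    xs.foldl (fun acc x => PySem.List.insertBy
      (fun a b => decide ((if p a then (0:Nat) else 1) < (if p b then (0:Nat) else 1))) x acc) (A ++ B)
      = (A ++ xs.filter p) ++ (B ++ xs.filter (fun x => !p x)) := by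
  induction xs generalizing A B with
  | nil => simp
  | cons x xs ih =>
    by_cases hx : p x = true
    · have step : PySem.List.insertBy
          (fun a b => decide ((if p a then (0:Nat) else 1) < (if p b then (0:Nat) else 1))) x (A ++ B)
          = (A ++ [x]) ++ B := by
        rw [pv_insertBy_append]
        · cases B with
          | nil => simp [PySem.List.insertBy]
          | cons b B =>
            have hb := hB b (by simp)
            simp [PySem.List.insertBy, hx, hb]
        · intro a ha; simp [hx, hA a ha]
      rw [List.foldl_cons, step, ih (A ++ [x]) B
        (by intro a ha; rcases List.mem_append.1 ha with h | h
            · exact hA a h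
            · simp at h; simpa [h] using hx) hB]
      simp [List.filter_cons, hx]
    · have hx' : p x = false := by simpa using hx
      have step : PySem.List.insertBy
          (fun a b => decide ((if p a then (0:Nat) else 1) < (if p b then (0:Nat) else 1))) x (A ++ B)
          = A ++ (B ++ [x]) := by
        rw [PySem.List.insertBy_of_forall_not_before, List.append_assoc]
        intro y hy
        rcases List.mem_append.1 hy with h | h
        · simp [hA y h, hx']
        · simp [hB y h, hx']
      rw [List.foldl_cons, step, ih A (B ++ [x]) hA
        (by intro b hb; rcases List.mem_append.1 hb with h | h
            · exact hB b h
            · simp at h; simpa [h] using hx')]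
      simp [List.filter_cons, hx']

theorem pv_sorted_two {α : Type} (p : α → Bool) (xs : List α) :
    PySem.List.sorted xs (fun x => if p x then (0:Nat) else 1)
      = xs.filter p ++ xs.filter (fun x => !p x) := by
  rw [PySem.List.sorted_eq_foldl_insertBy]
  simpa using pv_fold_two p xs [] []
    (by intro a ha; simp at ha) (by intro b hb; simp at hb)

-- ===== VERDICT (by name: the statement is the Claim_ definition above) =====
theorem filter_suggestions_by_context_py_spec : Claim_equal_filter_suggestions_by_context_py := by
  intro word suggestions context _hdom _hpre
  unfold Spec_filter_suggestions_by_context_py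
  unfold filter_suggestions_by_context_py filter_suggestions_by_context_py_alt
  by_cases hs : suggestions = []
  · simp [hs]
  · simp only [hs, if_false]
    by_cases hw : PySem.Chars.isupper (pvHead word) = true
    · simp only [hw, if_true]
      rw [pv_sorted_two]
      congr 1
      rw [List.map_append]
      have h1 : (suggestions.filter (fun s => PySem.Chars.isupper (pvHead s) || PySem.Chars.islower (pvHead s))).filter (fun s => PySem.Chars.isupper (pvHead s))
          = suggestions.filter (fun s => PySem.Chars.isupper (pvHead s)) := by
        rw [List.filter_filter]
        apply List.filter_congr
        intro s _
        by_cases h : PySem.Chars.isupper (pvHead s) = true <;> simp [h]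
      have h2 : (suggestions.filter (fun s => PySem.Chars.isupper (pvHead s) || PySem.Chars.islower (pvHead s))).filter (fun s => !PySem.Chars.isupper (pvHead s))
          = suggestions.filter (fun s => PySem.Chars.islower (pvHead s)) := by
        rw [List.filter_filter]
        apply List.filter_congr
        intro s _
        by_cases h : PySem.Chars.isupper (pvHead s) = true
        · simp [h, pv_up_not_low _ h]
        · simp at h; simp [h]
      rw [h1, h2]
      congr 1
      · rw [List.map_congr_left (g := id), List.map_id]
        intro s hsmem
        have hu : PySem.Chars.isupper (pvHead s) = true := by
          simpa using (List.mem_filter.1 hsmem).2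
        simp [hu]
      · apply List.map_congr_left
        intro s hsmem
        have hl : PySem.Chars.islower (pvHead s) = true := by
          simpa using (List.mem_filter.1 hsmem).2
        have hnu : PySem.Chars.isupper (pvHead s) = false := by
          by_contra h
          simp at h
          rw [pv_up_not_low _ h] at hl; exact absurd hl (by simp)
        simp [hnu]
    · simp [hw]
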